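-- pv_equiv track=rewrite | github.com/mattthewb5/OfferingMemorandum | multi-county-real-estate-research/core/demographics_calculator.py | _aggregate_age_distribution
-- ===== SOURCE A (Python) =====
-- from typing import Dict, List, Optional, Any, Tuple
--
-- def _aggregate_age_distribution(block_groups: List[Dict]) -> Dict[str, int]:
--     """Aggregate age distribution across block groups."""
--     brackets = {
--         '0-17 (Children)': sum(
--             (bg.get('male_under_5') or 0) + (bg.get('female_under_5') or 0) +
--             (bg.get('male_5_9') or 0) + (bg.get('female_5_9') or 0) +
--             (bg.get('male_10_14') or 0) + (bg.get('female_10_14') or 0) +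
--             (bg.get('male_15_17') or 0) + (bg.get('female_15_17') or 0)
--             for bg in block_groups
--         ),
--         '18-24 (Young Adults)': sum(
--             (bg.get('male_18_19') or 0) + (bg.get('female_18_19') or 0) +
--             (bg.get('male_20') or 0) + (bg.get('female_20') or 0) +
--             (bg.get('male_21') or 0) + (bg.get('female_21') or 0) +
--             (bg.get('male_22_24') or 0) + (bg.get('female_22_24') or 0)
--             for bg in block_groups
--         ),
--         '25-34 (Young Professionals)': sum(
--             (bg.get('male_25_29') or 0) + (bg.get('female_25_29') or 0) +
--             (bg.get('male_30_34') or 0) + (bg.get('female_30_34') or 0)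
--             for bg in block_groups
--         ),
--         '35-54 (Peak Earning)': sum(
--             (bg.get('male_35_39') or 0) + (bg.get('female_35_39') or 0) +
--             (bg.get('male_40_44') or 0) + (bg.get('female_40_44') or 0) +
--             (bg.get('male_45_49') or 0) + (bg.get('female_45_49') or 0) +
--             (bg.get('male_50_54') or 0) + (bg.get('female_50_54') or 0)
--             for bg in block_groups
--         ),
--         '55-64 (Pre-Retirement)': sum(
--             (bg.get('male_55_59') or 0) + (bg.get('female_55_59') or 0) +
--             (bg.get('male_60_61') or 0) + (bg.get('female_60_61') or 0) +
--             (bg.get('male_62_64') or 0) + (bg.get('female_62_64') or 0)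
--             for bg in block_groups
--         ),
--         '65+ (Seniors)': sum(
--             (bg.get('male_65_66') or 0) + (bg.get('female_65_66') or 0) +
--             (bg.get('male_67_69') or 0) + (bg.get('female_67_69') or 0) +
--             (bg.get('male_70_74') or 0) + (bg.get('female_70_74') or 0) +
--             (bg.get('male_75_79') or 0) + (bg.get('female_75_79') or 0) +
--             (bg.get('male_80_84') or 0) + (bg.get('female_80_84') or 0) +
--             (bg.get('male_85_plus') or 0) + (bg.get('female_85_plus') or 0)
--             for bg in block_groups
--         )
--     }
--     return brackets
-- ===== SOURCE B (Python) =====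
-- from typing import Dict, List
--
-- BRACKETS = [
--     ('0-17 (Children)',
--      ['male_under_5', 'female_under_5', 'male_5_9', 'female_5_9',
--       'male_10_14', 'female_10_14', 'male_15_17', 'female_15_17']),
--     ('18-24 (Young Adults)',
--      ['male_18_19', 'female_18_19', 'male_20', 'female_20',
--       'male_21', 'female_21', 'male_22_24', 'female_22_24']),
--     ('25-34 (Young Professionals)',
--      ['male_25_29', 'female_25_29', 'male_30_34', 'female_30_34']),
--     ('35-54 (Peak Earning)',
--      ['male_35_39', 'female_35_39', 'male_40_44', 'female_40_44',
--       'male_45_49', 'female_45_49', 'male_50_54', 'female_50_54']),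
--     ('55-64 (Pre-Retirement)',
--      ['male_55_59', 'female_55_59', 'male_60_61', 'female_60_61',
--       'male_62_64', 'female_62_64']),
--     ('65+ (Seniors)',
--      ['male_65_66', 'female_65_66', 'male_67_69', 'female_67_69',
--       'male_70_74', 'female_70_74', 'male_75_79', 'female_75_79',
--       'male_80_84', 'female_80_84', 'male_85_plus', 'female_85_plus']),
-- ]
--
-- def _aggregate_age_distribution(block_groups: List[Dict]) -> Dict[str, int]:
--     """Aggregate age distribution across block groups (table-driven single pass)."""
--     result = {name: 0 for name, _ in BRACKETS}
--     for bg in block_groups: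
--         for name, fields in BRACKETS:
--             result[name] += sum((bg.get(f) or 0) for f in fields)
--     return result
-- ===== Notes on version B (the rewrite author's own statement) =====
-- stated objective: simpler
-- what changed: Replaces six hardcoded per-bracket generator expressions (six passes over block_groups) with one table of (bracket, fields) pairs and a single accumulating pass over block_groups.
import Mathlib
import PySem

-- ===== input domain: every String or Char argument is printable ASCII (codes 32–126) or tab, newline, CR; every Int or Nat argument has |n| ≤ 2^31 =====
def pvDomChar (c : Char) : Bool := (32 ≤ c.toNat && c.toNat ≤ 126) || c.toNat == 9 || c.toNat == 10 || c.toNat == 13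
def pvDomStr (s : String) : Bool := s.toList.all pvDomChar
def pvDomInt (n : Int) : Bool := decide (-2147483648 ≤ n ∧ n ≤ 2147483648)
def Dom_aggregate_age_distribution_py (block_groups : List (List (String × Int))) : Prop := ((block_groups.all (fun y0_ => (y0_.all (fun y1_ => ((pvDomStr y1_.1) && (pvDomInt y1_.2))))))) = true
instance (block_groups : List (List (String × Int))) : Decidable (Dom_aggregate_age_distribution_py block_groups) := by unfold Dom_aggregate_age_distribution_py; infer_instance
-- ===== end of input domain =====

-- B replaces A's six hardcoded per-bracket generator expressions (six passes over the
-- block-group list) with one (bracket, fields) table and a single accumulating pass; simpler.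


-- ===== PORT A =====
-- `bg.get(f) or 0`: on int dict values, `x or 0` yields x unless x is missing or 0,
-- i.e. exactly get-with-default-0 (exact).
def pvGet (bg : List (String × Int)) (f : String) : Int :=
  (PySem.Dict.get? (PySem.Dict.mk bg) f).getD 0

-- the six `sum(... for bg in block_groups)` generator expressions of A, one helper each
def pvA1 (block_groups : List (List (String × Int))) : Int :=
  block_groups.foldl (fun acc bg => acc +
    (pvGet bg "male_under_5" + pvGet bg "female_under_5" +
     pvGet bg "male_5_9" + pvGet bg "female_5_9" +
     pvGet bg "male_10_14" + pvGet bg "female_10_14" +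
     pvGet bg "male_15_17" + pvGet bg "female_15_17")) 0
def pvA2 (block_groups : List (List (String × Int))) : Int :=
  block_groups.foldl (fun acc bg => acc +
    (pvGet bg "male_18_19" + pvGet bg "female_18_19" +
     pvGet bg "male_20" + pvGet bg "female_20" +
     pvGet bg "male_21" + pvGet bg "female_21" +
     pvGet bg "male_22_24" + pvGet bg "female_22_24")) 0
def pvA3 (block_groups : List (List (String × Int))) : Int :=
  block_groups.foldl (fun acc bg => acc +
    (pvGet bg "male_25_29" + pvGet bg "female_25_29" +
     pvGet bg "male_30_34" + pvGet bg "female_30_34")) 0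
def pvA4 (block_groups : List (List (String × Int))) : Int :=
  block_groups.foldl (fun acc bg => acc +
    (pvGet bg "male_35_39" + pvGet bg "female_35_39" +
     pvGet bg "male_40_44" + pvGet bg "female_40_44" +
     pvGet bg "male_45_49" + pvGet bg "female_45_49" +
     pvGet bg "male_50_54" + pvGet bg "female_50_54")) 0
def pvA5 (block_groups : List (List (String × Int))) : Int :=
  block_groups.foldl (fun acc bg => acc +
    (pvGet bg "male_55_59" + pvGet bg "female_55_59" +
     pvGet bg "male_60_61" + pvGet bg "female_60_61" +
     pvGet bg "male_62_64" + pvGet bg "female_62_64")) 0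
def pvA6 (block_groups : List (List (String × Int))) : Int :=
  block_groups.foldl (fun acc bg => acc +
    (pvGet bg "male_65_66" + pvGet bg "female_65_66" +
     pvGet bg "male_67_69" + pvGet bg "female_67_69" +
     pvGet bg "male_70_74" + pvGet bg "female_70_74" +
     pvGet bg "male_75_79" + pvGet bg "female_75_79" +
     pvGet bg "male_80_84" + pvGet bg "female_80_84" +
     pvGet bg "male_85_plus" + pvGet bg "female_85_plus")) 0

def aggregate_age_distribution_py (block_groups : List (List (String × Int))) : List (String × Int) :=
  [("0-17 (Children)", pvA1 block_groups),
   ("18-24 (Young Adults)", pvA2 block_groups),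
   ("25-34 (Young Professionals)", pvA3 block_groups),
   ("35-54 (Peak Earning)", pvA4 block_groups),
   ("55-64 (Pre-Retirement)", pvA5 block_groups),
   ("65+ (Seniors)", pvA6 block_groups)]

-- ===== PORT B =====
def pvF1 : List String :=
  ["male_under_5", "female_under_5", "male_5_9", "female_5_9",
   "male_10_14", "female_10_14", "male_15_17", "female_15_17"]
def pvF2 : List String :=
  ["male_18_19", "female_18_19", "male_20", "female_20",
   "male_21", "female_21", "male_22_24", "female_22_24"]
def pvF3 : List String :=
  ["male_25_29", "female_25_29", "male_30_34", "female_30_34"]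
def pvF4 : List String :=
  ["male_35_39", "female_35_39", "male_40_44", "female_40_44",
   "male_45_49", "female_45_49", "male_50_54", "female_50_54"]
def pvF5 : List String :=
  ["male_55_59", "female_55_59", "male_60_61", "female_60_61",
   "male_62_64", "female_62_64"]
def pvF6 : List String :=
  ["male_65_66", "female_65_66", "male_67_69", "female_67_69",
   "male_70_74", "female_70_74", "male_75_79", "female_75_79",
   "male_80_84", "female_80_84", "male_85_plus", "female_85_plus"]
def pvBRACKETS : List (String × List String) :=
  [("0-17 (Children)", pvF1), ("18-24 (Young Adults)", pvF2),
   ("25-34 (Young Professionals)", pvF3), ("35-54 (Peak Earning)", pvF4),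
   ("55-64 (Pre-Retirement)", pvF5), ("65+ (Seniors)", pvF6)]

-- `sum((bg.get(f) or 0) for f in fields)`
def pvBgSum (bg : List (String × Int)) (fields : List String) : Int :=
  fields.foldl (fun acc f => acc + (PySem.Dict.get? (PySem.Dict.mk bg) f).getD 0) 0

def aggregate_age_distribution_py_alt (block_groups : List (List (String × Int))) : List (String × Int) :=
  -- result = {name: 0 for name, _ in BRACKETS};
  -- for bg in block_groups: for name, fields in BRACKETS: result[name] += sum(...)
  (block_groups.foldl (fun res bg =>
      pvBRACKETS.foldl (fun res p =>
        PySem.Dict.insert res p.1 (PySem.Dict.getD res p.1 0 + pvBgSum bg p.2)) res)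
    (pvBRACKETS.foldl (fun d p => PySem.Dict.insert d p.1 0) PySem.Dict.empty)).items

-- ===== PRECONDITION & SPEC =====
def Spec_aggregate_age_distribution_py (block_groups : List (List (String × Int))) (out : List (String × Int)) : Prop := out = aggregate_age_distribution_py_alt block_groups
instance (block_groups : List (List (String × Int))) (out : List (String × Int)) : Decidable (Spec_aggregate_age_distribution_py block_groups out) := by unfold Spec_aggregate_age_distribution_py; infer_instance

-- ===== CLAIM (what is proved, stated in full; the proofs are below) =====
def Claim_equal_aggregate_age_distribution_py : Prop := ∀ (block_groups : List (List (String × Int))), Dom_aggregate_age_distribution_py block_groups → Spec_aggregate_age_distribution_py block_groups (aggregate_age_distribution_py block_groups)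

-- ===== LEMMAS AND PROOFS =====

-- total of one bracket's fields over a whole list of block groups
def pvS (fields : List String) (bgs : List (List (String × Int))) : Int :=
  (bgs.map (fun bg => pvBgSum bg fields)).sum

-- one iteration of B's outer loop, on the always-six-keys state
theorem pv_step_eq (bg : List (String × Int)) (a1 a2 a3 a4 a5 a6 : Int) :
    pvBRACKETS.foldl (fun res p =>
        PySem.Dict.insert res p.1 (PySem.Dict.getD res p.1 0 + pvBgSum bg p.2))
      (PySem.Dict.mk
        [("0-17 (Children)", a1), ("18-24 (Young Adults)", a2),
         ("25-34 (Young Professionals)", a3), ("35-54 (Peak Earning)", a4),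
         ("55-64 (Pre-Retirement)", a5), ("65+ (Seniors)", a6)]) =
    PySem.Dict.mk
      [("0-17 (Children)", a1 + pvBgSum bg pvF1),
       ("18-24 (Young Adults)", a2 + pvBgSum bg pvF2),
       ("25-34 (Young Professionals)", a3 + pvBgSum bg pvF3),
       ("35-54 (Peak Earning)", a4 + pvBgSum bg pvF4),
       ("55-64 (Pre-Retirement)", a5 + pvBgSum bg pvF5),
       ("65+ (Seniors)", a6 + pvBgSum bg pvF6)] := rfl

-- loop invariant of B's outer fold
theorem pv_inv (bgs : List (List (String × Int))) :
    ∀ (a1 a2 a3 a4 a5 a6 : Int),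
    bgs.foldl (fun res bg =>
        pvBRACKETS.foldl (fun res p =>
          PySem.Dict.insert res p.1 (PySem.Dict.getD res p.1 0 + pvBgSum bg p.2)) res)
      (PySem.Dict.mk
        [("0-17 (Children)", a1), ("18-24 (Young Adults)", a2),
         ("25-34 (Young Professionals)", a3), ("35-54 (Peak Earning)", a4),
         ("55-64 (Pre-Retirement)", a5), ("65+ (Seniors)", a6)]) =
    PySem.Dict.mk
      [("0-17 (Children)", a1 + pvS pvF1 bgs),
       ("18-24 (Young Adults)", a2 + pvS pvF2 bgs),
       ("25-34 (Young Professionals)", a3 + pvS pvF3 bgs),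
       ("35-54 (Peak Earning)", a4 + pvS pvF4 bgs),
       ("55-64 (Pre-Retirement)", a5 + pvS pvF5 bgs),
       ("65+ (Seniors)", a6 + pvS pvF6 bgs)] := by
  induction bgs with
  | nil => intro a1 a2 a3 a4 a5 a6; simp [pvS]
  | cons bg rest ih =>
    intro a1 a2 a3 a4 a5 a6
    rw [List.foldl_cons, pv_step_eq, ih]
    simp [pvS, add_assoc]

-- each of A's six generator sums equals the table-driven bracket total
theorem pvA1_eq (bgs : List (List (String × Int))) : pvA1 bgs = pvS pvF1 bgs := by
  unfold pvA1 pvS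
  rw [PySem.List.foldl_add, zero_add]
  congr 1
  apply List.map_congr_left
  intro bg _
  simp only [pvBgSum, pvGet, pvF1, List.foldl]
  ring
theorem pvA2_eq (bgs : List (List (String × Int))) : pvA2 bgs = pvS pvF2 bgs := by
  unfold pvA2 pvS
  rw [PySem.List.foldl_add, zero_add]
  congr 1
  apply List.map_congr_left
  intro bg _
  simp only [pvBgSum, pvGet, pvF2, List.foldl]
  ring
theorem pvA3_eq (bgs : List (List (String × Int))) : pvA3 bgs = pvS pvF3 bgs := by
  unfold pvA3 pvS
  rw [PySem.List.foldl_add, zero_add]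
  congr 1
  apply List.map_congr_left
  intro bg _
  simp only [pvBgSum, pvGet, pvF3, List.foldl]
  ring
theorem pvA4_eq (bgs : List (List (String × Int))) : pvA4 bgs = pvS pvF4 bgs := by
  unfold pvA4 pvS
  rw [PySem.List.foldl_add, zero_add]
  congr 1
  apply List.map_congr_left
  intro bg _
  simp only [pvBgSum, pvGet, pvF4, List.foldl]
  ring
theorem pvA5_eq (bgs : List (List (String × Int))) : pvA5 bgs = pvS pvF5 bgs := by
  unfold pvA5 pvS
  rw [PySem.List.foldl_add, zero_add]
  congr 1
  apply List.map_congr_left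
  intro bg _
  simp only [pvBgSum, pvGet, pvF5, List.foldl]
  ring
theorem pvA6_eq (bgs : List (List (String × Int))) : pvA6 bgs = pvS pvF6 bgs := by
  unfold pvA6 pvS
  rw [PySem.List.foldl_add, zero_add]
  congr 1
  apply List.map_congr_left
  intro bg _
  simp only [pvBgSum, pvGet, pvF6, List.foldl]
  ring

-- ===== VERDICT (by name: the statement is the Claim_ definition above) =====
theorem aggregate_age_distribution_py_spec : Claim_equal_aggregate_age_distribution_py := by
  intro bgs _
  unfold Spec_aggregate_age_distribution_py aggregate_age_distribution_py
    aggregate_age_distribution_py_alt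
  rw [show (pvBRACKETS.foldl (fun d p => PySem.Dict.insert d p.1 0)
        (PySem.Dict.empty : PySem.Dict String Int)) =
      PySem.Dict.mk
        [("0-17 (Children)", 0), ("18-24 (Young Adults)", 0),
         ("25-34 (Young Professionals)", 0), ("35-54 (Peak Earning)", 0),
         ("55-64 (Pre-Retirement)", 0), ("65+ (Seniors)", 0)] from rfl,
    pv_inv]
  simp [pvA1_eq, pvA2_eq, pvA3_eq, pvA4_eq, pvA5_eq, pvA6_eq]
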